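-- pv_equiv track=rewrite | github.com/Levishery/Flywire-Neuron-Tracing | dataset/sample_connector.py | fafb_to_block
-- ===== SOURCE A (Python) =====
-- import math
--
-- def fafb_to_block(x, y, z):
--     '''
--     (x,y,z):fafb坐标
--     (x_block,y_block,z_block):block块号
--     (x_pixel,y_pixel,z_pixel):块内像素号,其中z为帧序号,为了使得z属于中间部分,强制z属于[29,54)
--     文件名：z/y/z-xxx-y-xx-x-xx
--     '''
--     x_block_float = (x + 17631) / 1736 / 4
--     y_block_float = (y + 19211) / 1736 / 4
--     z_block_float = (z - 15) / 26
--     x_block = math.floor(x_block_float)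
--     y_block = math.floor(y_block_float)
--     z_block = math.floor(z_block_float)
--     x_pixel = (x_block_float - x_block) * 1736
--     y_pixel = (y_block_float - y_block) * 1736
--     z_pixel = (z - 15) - z_block * 26
--     while z_pixel < 28:
--         z_block = z_block - 1
--         z_pixel = z_pixel + 26
--     return x_block, y_block, z_block
-- ===== SOURCE B (Python) =====
-- def fafb_to_block(x, y, z):
--     # Closed form: integer floor-division replaces the float divisions + floor,
--     # and (z - 43) // 26 is the fixed point A's while-loop converges to.
--     return (x + 17631) // 6944, (y + 19211) // 6944, (z - 43) // 26
-- ===== Notes on version B (the rewrite author's own statement) =====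
-- stated objective: simpler
-- what changed: Replaces the float-divide-then-floor computations and the z_pixel normalisation while-loop with three closed-form integer floor divisions and drops the unused pixel variables.
import Mathlib
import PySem

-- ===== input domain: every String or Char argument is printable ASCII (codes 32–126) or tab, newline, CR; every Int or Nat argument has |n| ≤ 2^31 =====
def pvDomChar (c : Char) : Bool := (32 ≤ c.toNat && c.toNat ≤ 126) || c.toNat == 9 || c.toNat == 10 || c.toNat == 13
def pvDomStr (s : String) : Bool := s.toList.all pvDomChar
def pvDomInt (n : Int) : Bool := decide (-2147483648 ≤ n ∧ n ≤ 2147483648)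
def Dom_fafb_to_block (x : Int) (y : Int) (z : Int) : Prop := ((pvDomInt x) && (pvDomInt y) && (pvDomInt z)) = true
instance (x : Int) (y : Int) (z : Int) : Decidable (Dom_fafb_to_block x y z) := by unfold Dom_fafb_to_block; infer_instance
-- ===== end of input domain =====

-- B replaces A's float-divide-then-floor computations and z_pixel while-loop with three
-- closed-form integer floor divisions (simpler; same result on the stated domain).


-- ===== PORT A =====
-- A's while loop: z_pixel increases by 26 > 0 each step, so it terminates.
def fafbZLoop (z_block : Int) (z_pixel : Int) : Int × Int :=
  if z_pixel < 28 then fafbZLoop (z_block - 1) (z_pixel + 26)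
  else (z_block, z_pixel)
termination_by (28 - z_pixel).toNat
decreasing_by omega

-- Float note: A computes math.floor(((x+17631)/1736)/4) etc. in IEEE doubles. For |x| ≤ 2^31
-- the double rounding error (< 2^-20) is far below the distance (≥ 1/6944, resp. 1/26) from any
-- non-integer exact quotient to the nearest integer, and integer-valued quotients are computed
-- exactly, so the floor of the float chain equals the exact floor; we port it as PySem floordiv.
def fafb_to_block (x : Int) (y : Int) (z : Int) : Int × Int × Int :=
  let x_block := PySem.Int.floordiv (x + 17631) (1736 * 4)
  let y_block := PySem.Int.floordiv (y + 19211) (1736 * 4)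
  let z_block := PySem.Int.floordiv (z - 15) 26
  -- x_pixel / y_pixel are computed by A but unused in the result; omitted (pure, no effect)
  let z_pixel := (z - 15) - z_block * 26
  let r := fafbZLoop z_block z_pixel
  (x_block, y_block, r.1)

-- ===== PORT B =====
def fafb_to_block_alt (x : Int) (y : Int) (z : Int) : Int × Int × Int :=
  (PySem.Int.floordiv (x + 17631) 6944, PySem.Int.floordiv (y + 19211) 6944,
   PySem.Int.floordiv (z - 43) 26)

-- ===== PRECONDITION & SPEC =====
def Spec_fafb_to_block (x : Int) (y : Int) (z : Int) (out : Int × Int × Int) : Prop := out = fafb_to_block_alt x y z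
instance (x : Int) (y : Int) (z : Int) (out : Int × Int × Int) : Decidable (Spec_fafb_to_block x y z out) := by unfold Spec_fafb_to_block; infer_instance

-- ===== CLAIM (what is proved, stated in full; the proofs are below) =====
def Claim_equal_fafb_to_block : Prop := ∀ (x : Int) (y : Int) (z : Int), Dom_fafb_to_block x y z → Spec_fafb_to_block x y z (fafb_to_block x y z)

-- ===== LEMMAS AND PROOFS =====

-- The loop started at (floor((z-15)/26), (z-15) mod 26) returns floor((z-43)/26) as block index.
theorem fafbZLoop_closed (z : Int) :
    (fafbZLoop ((z - 15) / 26) ((z - 15) - ((z - 15) / 26) * 26)).1 = (z - 43) / 26 := by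
  have h0 : (z - 15) - ((z - 15) / 26) * 26 = (z - 15) % 26 := by omega
  have hr : 0 ≤ (z - 15) % 26 ∧ (z - 15) % 26 < 26 := ⟨Int.emod_nonneg _ (by norm_num), Int.emod_lt_of_pos _ (by norm_num)⟩
  rw [h0, fafbZLoop]
  rw [if_pos (by omega)]
  by_cases h2 : (z - 15) % 26 + 26 < 28
  · rw [fafbZLoop, if_pos h2, fafbZLoop, if_neg (by omega)]
    omega
  · rw [fafbZLoop, if_neg h2]
    omega

theorem fafb_to_block_eq (x y z : Int) : fafb_to_block x y z = fafb_to_block_alt x y z := by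
  unfold fafb_to_block fafb_to_block_alt
  have e26 : ∀ a : Int, PySem.Int.floordiv a 26 = a / 26 :=
    fun a => PySem.Int.floordiv_eq_ediv_of_pos (by norm_num)
  have e1 : ∀ a : Int, PySem.Int.floordiv a (1736 * 4) = a / 6944 :=
    fun a => by rw [show ((1736 * 4 : Int)) = 6944 by norm_num]
                exact PySem.Int.floordiv_eq_ediv_of_pos (by norm_num)
  have e2 : ∀ a : Int, PySem.Int.floordiv a 6944 = a / 6944 :=
    fun a => PySem.Int.floordiv_eq_ediv_of_pos (by norm_num)
  simp only [e26, e1, e2]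
  refine Prod.ext rfl (Prod.ext rfl ?_)
  simpa using fafbZLoop_closed z

-- ===== VERDICT (by name: the statement is the Claim_ definition above) =====
theorem fafb_to_block_spec : Claim_equal_fafb_to_block := by
  intro x y z _
  unfold Spec_fafb_to_block
  exact fafb_to_block_eq x y z
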